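-- pv_equiv track=rewrite | github.com/HeitorRoriz/skyt_experiment | src/normalize.py | _extract_longest_code_block
-- ===== SOURCE A (Python) =====
-- def _extract_longest_code_block(text: str) -> str:
--     """Fallback: extract the longest code-like block"""
--     lines = text.split('\n')
--     code_blocks = []
--     current_block = []
--
--     for line in lines:
--         # Heuristic: line looks like code if it has indentation or Python keywords
--         if _looks_like_code(line):
--             current_block.append(line)
--         else:
--             if current_block:
--                 code_blocks.append('\n'.join(current_block))
--                 current_block = []
--
--     # Add final block if exists
--     if current_block:
--         code_blocks.append('\n'.join(current_block))
--
--     # Return longest block, or entire text if no blocks found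
--     if code_blocks:
--         return max(code_blocks, key=len).strip()
--     else:
--         return text.strip()
--
-- def _looks_like_code(line: str) -> bool:
--     """Heuristic to determine if a line looks like Python code"""
--     stripped = line.strip()
--
--     if not stripped:
--         return False
--
--     # Check for Python keywords
--     python_keywords = ['def ', 'class ', 'if ', 'else:', 'elif ', 'for ', 'while ',
--                       'return ', 'import ', 'from ', 'try:', 'except:', 'with ']
--
--     for keyword in python_keywords:
--         if stripped.startswith(keyword):
--             return True
--
--     # Check for indentation (likely code)
--     if line.startswith('    ') or line.startswith('\t'):
--         return True
--
--     # Check for assignment or function calls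
--     if '=' in stripped or '(' in stripped:
--         return True
--
--     return False
-- ===== SOURCE B (Python) =====
-- def _looks_like_code(line: str) -> bool:
--     """Single-expression heuristic: non-blank and (keyword-led, indented, or has '='/'(')"""
--     s = line.strip()
--     keywords = ('def ', 'class ', 'if ', 'else:', 'elif ', 'for ', 'while ',
--                 'return ', 'import ', 'from ', 'try:', 'except:', 'with ')
--     return bool(s) and (s.startswith(keywords)
--                         or line.startswith(('    ', '\t'))
--                         or '=' in s or '(' in s)
--
--
-- def _code_blocks(lines):
--     """Recursive run-grouping: each maximal run of code-like lines becomes one joined block."""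
--     if not lines:
--         return []
--     if not _looks_like_code(lines[0]):
--         return _code_blocks(lines[1:])
--     i = 1
--     while i < len(lines) and _looks_like_code(lines[i]):
--         i += 1
--     return ['\n'.join(lines[:i])] + _code_blocks(lines[i:])
--
--
-- def _extract_longest_code_block(text: str) -> str:
--     """Fallback: extract the longest code-like block"""
--     blocks = _code_blocks(text.split('\n'))
--     return max(blocks, key=len).strip() if blocks else text.strip()
-- ===== Notes on version B (the rewrite author's own statement) =====
-- stated objective: idiomatic
-- what changed: The manual accumulator/flush loop is replaced by a recursive run-grouping helper that joins each maximal run of code-like lines in one step, and the keyword/indentation heuristic becomes a single boolean expression using startswith on a tuple.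
import Mathlib
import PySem

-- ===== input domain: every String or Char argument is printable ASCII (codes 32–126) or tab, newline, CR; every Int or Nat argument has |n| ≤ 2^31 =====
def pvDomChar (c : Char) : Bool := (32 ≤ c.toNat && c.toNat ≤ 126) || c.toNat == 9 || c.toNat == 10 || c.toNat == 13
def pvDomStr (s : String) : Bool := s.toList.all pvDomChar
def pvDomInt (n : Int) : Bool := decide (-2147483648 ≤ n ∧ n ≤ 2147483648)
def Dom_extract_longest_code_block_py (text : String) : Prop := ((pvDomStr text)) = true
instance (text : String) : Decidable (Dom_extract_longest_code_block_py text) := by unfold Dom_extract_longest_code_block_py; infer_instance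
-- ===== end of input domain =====

-- B replaces A's per-line accumulator/flush loop by a recursive run-grouping helper (idiomatic decomposition, same cost).

-- ===== PORT A =====
def pyKeywords : List String := ["def ", "class ", "if ", "else:", "elif ", "for ", "while ",
    "return ", "import ", "from ", "try:", "except:", "with "]

-- the 'for keyword in python_keywords: if stripped.startswith(keyword): return True' loop
def startsAnyA (stripped : String) : List String → Bool
  | [] => false
  | k :: ks => if PySem.Str.startswith stripped k then true else startsAnyA stripped ks

def looksLikeCodeA (line : String) : Bool :=
  let stripped := PySem.Str.strip line
  if stripped = "" then false
  else if startsAnyA stripped pyKeywords then true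
  else if PySem.Str.startswith line "    " || PySem.Str.startswith line "\t" then true
  else if PySem.Str.isIn "=" stripped || PySem.Str.isIn "(" stripped then true
  else false

-- one iteration of A's for-loop over (code_blocks, current_block)
def stepA (st : List String × List String) (line : String) : List String × List String :=
  if looksLikeCodeA line then (st.1, st.2 ++ [line])
  else if st.2 ≠ [] then (st.1 ++ [PySem.Str.join "\n" st.2], [])
  else st

def extract_longest_code_block_py (text : String) : String :=
  -- text.split('\n'): the separator is the nonempty literal "\n", so split? is always `some`
  let lines := (PySem.Str.split? text "\n").getD []
  let st := lines.foldl stepA ([], [])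
  let code_blocks := if st.2 ≠ [] then st.1 ++ [PySem.Str.join "\n" st.2] else st.1
  if code_blocks ≠ [] then
    PySem.Str.strip (PySem.List.maxD code_blocks PySem.Str.len "")
  else
    PySem.Str.strip text

-- ===== PORT B =====
def looksLikeCodeAlt (line : String) : Bool :=
  let s := PySem.Str.strip line
  s ≠ "" && (pyKeywords.any (PySem.Str.startswith s)
              || PySem.Str.startswith line "    " || PySem.Str.startswith line "\t"
              || PySem.Str.isIn "=" s || PySem.Str.isIn "(" s)

-- _code_blocks: the while loop takes the longest code-like prefix (takeWhile/dropWhile)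
def codeBlocksAlt : List String → List String
  | [] => []
  | l :: ls =>
    if looksLikeCodeAlt l then
      PySem.Str.join "\n" (l :: ls.takeWhile looksLikeCodeAlt)
        :: codeBlocksAlt (ls.dropWhile looksLikeCodeAlt)
    else codeBlocksAlt ls
termination_by xs => xs.length
decreasing_by
  · exact Nat.lt_succ_of_le (ls.length_dropWhile_le _)
  · exact Nat.lt_succ_of_le (Nat.le_refl _)

def extract_longest_code_block_py_alt (text : String) : String :=
  let blocks := codeBlocksAlt ((PySem.Str.split? text "\n").getD [])
  if blocks ≠ [] then PySem.Str.strip (PySem.List.maxD blocks PySem.Str.len "")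
  else PySem.Str.strip text

-- ===== PRECONDITION & SPEC =====
def Spec_extract_longest_code_block_py (text : String) (out : String) : Prop := out = extract_longest_code_block_py_alt text
instance (text : String) (out : String) : Decidable (Spec_extract_longest_code_block_py text out) := by unfold Spec_extract_longest_code_block_py; infer_instance

-- ===== CLAIM (what is proved, stated in full; the proofs are below) =====
def Claim_equal_extract_longest_code_block_py : Prop := ∀ (text : String), Dom_extract_longest_code_block_py text → Spec_extract_longest_code_block_py text (extract_longest_code_block_py text)

-- ===== LEMMAS AND PROOFS =====

lemma startsAnyA_eq_any (s : String) (ks : List String) :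
    startsAnyA s ks = ks.any (PySem.Str.startswith s) := by
  induction ks with
  | nil => rfl
  | cons k ks ih =>
    simp only [startsAnyA, List.any_cons, ih]
    cases PySem.Str.startswith s k <;> simp

lemma looks_eq (line : String) : looksLikeCodeAlt line = looksLikeCodeA line := by
  simp only [looksLikeCodeA, looksLikeCodeAlt, startsAnyA_eq_any]
  by_cases h : PySem.Str.strip line = ""
  · simp [h]
  · simp only [h, if_false, ne_eq, not_false_eq_true, decide_true, Bool.true_and]
    cases pyKeywords.any (PySem.Str.startswith (PySem.Str.strip line)) <;>
      cases PySem.Str.startswith line "    " <;>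
        cases PySem.Str.startswith line "\t" <;>
          cases PySem.Str.isIn "=" (PySem.Str.strip line) <;>
            cases PySem.Str.isIn "(" (PySem.Str.strip line) <;> simp

lemma stepA_pos (st : List String × List String) (line : String)
    (hp : looksLikeCodeA line = true) : stepA st line = (st.1, st.2 ++ [line]) := by
  simp [stepA, hp]

lemma stepA_neg_flush (st : List String × List String) (line : String)
    (hp : looksLikeCodeA line = false) (hc : st.2 ≠ []) :
    stepA st line = (st.1 ++ [PySem.Str.join "\n" st.2], []) := by
  simp [stepA, hp, hc]

lemma stepA_neg_skip (st : List String × List String) (line : String)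
    (hp : looksLikeCodeA line = false) (hc : st.2 = []) : stepA st line = st := by
  simp [stepA, hp, hc]

lemma codeBlocksAlt_cons_pos (l : String) (ls : List String)
    (hp : looksLikeCodeAlt l = true) :
    codeBlocksAlt (l :: ls)
      = PySem.Str.join "\n" (l :: ls.takeWhile looksLikeCodeAlt)
          :: codeBlocksAlt (ls.dropWhile looksLikeCodeAlt) := by
  rw [codeBlocksAlt]; simp [hp]

lemma codeBlocksAlt_cons_neg (l : String) (ls : List String)
    (hp : looksLikeCodeAlt l = false) : codeBlocksAlt (l :: ls) = codeBlocksAlt ls := by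
  rw [codeBlocksAlt]; simp [hp]

-- A's fold threads code_blocks as a pure prefix
lemma foldA_prefix (ls : List String) (cb cur : List String) :
    ls.foldl stepA (cb, cur)
      = (cb ++ (ls.foldl stepA ([], cur)).1, (ls.foldl stepA ([], cur)).2) := by
  induction ls generalizing cb cur with
  | nil => simp
  | cons l ls ih =>
    simp only [List.foldl_cons]
    by_cases hp : looksLikeCodeA l = true
    · rw [stepA_pos _ _ hp, stepA_pos _ _ hp]
      exact ih cb (cur ++ [l])
    · have hp' : looksLikeCodeA l = false := by simpa using hp
      by_cases hc : cur = []
      · rw [stepA_neg_skip _ _ hp' hc, stepA_neg_skip _ _ hp' hc]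
        exact ih cb cur
      · rw [stepA_neg_flush _ _ hp' hc, stepA_neg_flush _ _ hp' hc]
        simp only [List.nil_append]
        rw [ih (cb ++ [PySem.Str.join "\n" cur]) [], ih [PySem.Str.join "\n" cur] []]
        simp [List.append_assoc]

def finalizeA (st : List String × List String) : List String :=
  if st.2 ≠ [] then st.1 ++ [PySem.Str.join "\n" st.2] else st.1

lemma finalizeA_prefix (pre c cur : List String) :
    finalizeA (pre ++ c, cur) = pre ++ finalizeA (c, cur) := by
  unfold finalizeA
  split_ifs <;> simp

-- characterisation of A's fold: a pending run `cur` is completed by the next maximal run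
lemma foldA_blocks (ls : List String) (cur : List String) :
    finalizeA (ls.foldl stepA ([], cur))
      = if cur = [] then codeBlocksAlt ls
        else PySem.Str.join "\n" (cur ++ ls.takeWhile looksLikeCodeAlt)
              :: codeBlocksAlt (ls.dropWhile looksLikeCodeAlt) := by
  induction ls generalizing cur with
  | nil =>
    by_cases hc : cur = [] <;> simp [finalizeA, hc, codeBlocksAlt]
  | cons l ls ih =>
    by_cases hp : looksLikeCodeAlt l = true
    · have hpA : looksLikeCodeA l = true := by rw [← looks_eq]; exact hp
      simp only [List.foldl_cons]
      rw [stepA_pos _ _ hpA]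
      simp only []
      rw [ih (cur ++ [l])]
      by_cases hc : cur = []
      · subst hc
        simp [codeBlocksAlt_cons_pos _ _ hp]
      · simp [hc, hp, List.append_assoc]
    · have hp' : looksLikeCodeAlt l = false := by simpa using hp
      have hpA : looksLikeCodeA l = false := by rw [← looks_eq]; exact hp'
      by_cases hc : cur = []
      · simp only [List.foldl_cons]
        rw [stepA_neg_skip _ _ hpA (by simpa using hc), ih cur]
        simp [hc, codeBlocksAlt_cons_neg _ _ hp']
      · simp only [List.foldl_cons]
        rw [stepA_neg_flush _ _ hpA (by simpa using hc)]
        simp only [List.nil_append]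
        rw [foldA_prefix ls [PySem.Str.join "\n" cur] []]
        rw [finalizeA_prefix]
        rw [Prod.mk.eta, ih [], if_pos rfl]
        simp [hc, codeBlocksAlt_cons_neg _ _ hp', hp']

lemma blocks_eq (ls : List String) :
    finalizeA (ls.foldl stepA ([], [])) = codeBlocksAlt ls := by
  rw [foldA_blocks]; simp

-- ===== VERDICT (by name: the statement is the Claim_ definition above) =====
theorem extract_longest_code_block_py_spec : Claim_equal_extract_longest_code_block_py := by
  intro text _
  unfold Spec_extract_longest_code_block_py extract_longest_code_block_py
           extract_longest_code_block_py_alt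
  have h := blocks_eq ((PySem.Str.split? text "\n").getD [])
  unfold finalizeA at h
  simp only [ne_eq] at h ⊢
  rw [h]
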